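-- pv_equiv track=rewrite | github.com/ikostan/python | solutions/python/pig-latin/15/pig_latin.py | get_consonant_cluster_index
-- ===== SOURCE A (Python) =====
-- def is_vowel(char: str) -> bool:
--     """
--     Check if a character is a vowel (a, e, i, o, or u).
--
--     :param char: The character to check
--     :return: True if the character is a vowel, False otherwise
--     """
--     return char in "aeiou"
--
-- def get_consonant_cluster_index(text: str) -> int:
--     """
--     Find the index of the last consonant in the initial consonant cluster.
--
--     :param text: The word to analyze
--     :return: The index of the last consonant in the initial consonant cluster
--     """
--     index: int = 0
--     for i, char in enumerate(text):
--         if not is_vowel(char):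
--             index = i
--         else:
--             break
--
--     return index
-- ===== SOURCE B (Python) =====
-- VOWELS = "aeiou"
--
-- def get_consonant_cluster_index(text: str) -> int:
--     hits = [p for p in (text.find(v) for v in VOWELS) if p != -1]
--     if hits:
--         return max(min(hits) - 1, 0)
--     return max(len(text) - 1, 0)
-- ===== Notes on version B (the rewrite author's own statement) =====
-- stated objective: alternative
-- what changed: B does no character loop at all: it asks str.find for the position of each of the five vowels, takes the minimum hit (or len(text) when none is found) and clamps minus-one to zero, instead of A's single scan carrying a last-consonant index with break.
import Mathlib
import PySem

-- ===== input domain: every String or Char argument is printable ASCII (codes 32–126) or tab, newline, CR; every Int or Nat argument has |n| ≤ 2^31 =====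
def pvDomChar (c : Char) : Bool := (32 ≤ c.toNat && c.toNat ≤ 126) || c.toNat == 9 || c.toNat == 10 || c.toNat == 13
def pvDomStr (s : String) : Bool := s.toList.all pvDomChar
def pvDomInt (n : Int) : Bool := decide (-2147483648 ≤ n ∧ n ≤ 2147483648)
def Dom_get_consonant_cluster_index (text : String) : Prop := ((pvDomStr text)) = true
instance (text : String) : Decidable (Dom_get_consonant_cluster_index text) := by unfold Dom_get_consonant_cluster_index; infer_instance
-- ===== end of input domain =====

-- B does no character loop: it takes the minimum of str.find over the five vowels (default len(text)) and clamps minus-one to zero (objective: alternative).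

-- ===== PORT A =====
-- `char in "aeiou"` on a single character = membership in its characters (exact: char is one Char)
def is_vowel (c : Char) : Bool := "aeiou".toList.contains c

-- the `for i, char in enumerate(text)` loop with early break, carrying `index`
def pvLoopA : List Char → Int → Int → Int
  | [], _, index => index
  | c :: rest, i, index => if is_vowel c then index else pvLoopA rest (i + 1) i

def get_consonant_cluster_index (text : String) : Int :=
  pvLoopA text.toList 0 0

-- ===== PORT B =====
def pvVOWELS : String := "aeiou"

-- hits = [p for p in (text.find(v) for v in VOWELS) if p != -1]
def pvHits (text : String) : List Int :=
  (pvVOWELS.toList.map (fun v => PySem.Str.find text (String.ofList [v]))).filter (· != -1)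

def get_consonant_cluster_index_alt (text : String) : Int :=
  match pvHits text with
  | h :: t => max (t.foldl min h - 1) 0
  | [] => max ((PySem.Str.len text : Int) - 1) 0

-- ===== PRECONDITION & SPEC =====
def Spec_get_consonant_cluster_index (text : String) (out : Int) : Prop := out = get_consonant_cluster_index_alt text
instance (text : String) (out : Int) : Decidable (Spec_get_consonant_cluster_index text out) := by unfold Spec_get_consonant_cluster_index; infer_instance

-- ===== CLAIM (what is proved, stated in full; the proofs are below) =====
def Claim_equal_get_consonant_cluster_index : Prop := ∀ (text : String), Dom_get_consonant_cluster_index text → Spec_get_consonant_cluster_index text (get_consonant_cluster_index text)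

-- ===== LEMMAS AND PROOFS =====

-- proof-side: index of the first vowel, or length when there is none
def pvFv : List Char → Int
  | [] => 0
  | c :: rest => if is_vowel c then 0 else pvFv rest + 1

theorem pvFv_nonneg (l : List Char) : 0 ≤ pvFv l := by
  induction l with
  | nil => simp [pvFv]
  | cons c rest ih => simp only [pvFv]; split <;> omega

theorem pvLoopA_eq (l : List Char) (i : Int) : pvLoopA l (i + 1) i = i + pvFv l := by
  induction l generalizing i with
  | nil => simp [pvLoopA, pvFv]
  | cons c rest ih =>
    simp only [pvLoopA, pvFv]
    split
    · omega
    · have := ih (i + 1); omega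

-- A's result in closed form
theorem portA_eq (text : String) :
    get_consonant_cluster_index text = max (pvFv text.toList - 1) 0 := by
  unfold get_consonant_cluster_index
  cases h : text.toList with
  | nil => simp [pvLoopA, pvFv]
  | cons c rest =>
    simp only [pvLoopA, pvFv]
    split
    · omega
    · have h1 := pvLoopA_eq rest 0
      have h2 := pvFv_nonneg rest
      omega

-- [a] is a prefix of l iff l starts with a
theorem singleton_prefix_iff (a : Char) (l : List Char) : [a] <+: l ↔ ∃ t, l = a :: t := by
  constructor
  · rintro ⟨t, rfl⟩; exact ⟨t, rfl⟩
  · rintro ⟨t, rfl⟩; exact ⟨t, rfl⟩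

theorem singleton_infix_iff (a : Char) (l : List Char) : [a] <:+: l ↔ a ∈ l := by
  constructor
  · intro h; exact h.subset (List.mem_singleton_self a)
  · intro h
    obtain ⟨s, t, rfl⟩ := List.append_of_mem h
    exact ⟨s, t, by simp⟩

-- cons unfolding of single-character find
theorem find_single_nil (v : Char) : PySem.Chars.find ([] : List Char) [v] = -1 := by
  rw [PySem.Chars.find_eq_neg_one_iff]
  intro h
  simp at h

theorem find_single_cons (c v : Char) (rest : List Char) :
    PySem.Chars.find (c :: rest) [v] =
      if c = v then 0
      else if PySem.Chars.find rest [v] = -1 then -1 else PySem.Chars.find rest [v] + 1 := by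
  by_cases hcv : c = v
  · subst hcv
    have hin : [c] <:+: c :: rest := (singleton_infix_iff c (c :: rest)).mpr (List.mem_cons_self ..)
    have hnn : 0 ≤ PySem.Chars.find (c :: rest) [c] := (PySem.Chars.find_nonneg_iff _ _).mpr hin
    obtain ⟨hpre, hmin⟩ := PySem.Chars.find_spec hnn
    have h0 : PySem.Chars.find (c :: rest) [c] = 0 := by
      by_contra hne
      have hpos : 0 < (PySem.Chars.find (c :: rest) [c]).toNat := by omega
      exact hmin 0 hpos ((singleton_prefix_iff c (c :: rest)).mpr ⟨rest, rfl⟩)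
    rw [h0, if_pos rfl]
  · rw [if_neg hcv]
    by_cases hr : PySem.Chars.find rest [v] = -1
    · rw [if_pos hr, PySem.Chars.find_eq_neg_one_iff]
      rw [PySem.Chars.find_eq_neg_one_iff] at hr
      intro hin
      rcases List.mem_cons.mp ((singleton_infix_iff v (c :: rest)).mp hin) with h | h
      · exact hcv h.symm
      · exact hr ((singleton_infix_iff v rest).mpr h)
    · rw [if_neg hr]
      have hk : 0 ≤ PySem.Chars.find rest [v] := by
        have := PySem.Chars.neg_one_le_find rest [v]; omega
      obtain ⟨hpreR, hminR⟩ := PySem.Chars.find_spec hk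
      have hinC : [v] <:+: c :: rest := by
        rw [singleton_infix_iff]
        exact List.mem_cons_of_mem c ((singleton_infix_iff v rest).mp
          ((PySem.Chars.find_nonneg_iff _ _).mp hk))
      have hnn : 0 ≤ PySem.Chars.find (c :: rest) [v] := (PySem.Chars.find_nonneg_iff _ _).mpr hinC
      obtain ⟨hpreC, hminC⟩ := PySem.Chars.find_spec hnn
      set m := (PySem.Chars.find (c :: rest) [v]).toNat with hm
      set K := (PySem.Chars.find rest [v]).toNat with hK
      have hm0 : m ≠ 0 := by
        intro h0
        rw [h0, List.drop_zero] at hpreC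
        obtain ⟨t, ht⟩ := (singleton_prefix_iff v (c :: rest)).mp hpreC
        injection ht with h1 _
        exact hcv h1
      have hub : m ≤ K + 1 := by
        by_contra hgt
        exact hminC (K + 1) (by omega) (by rw [List.drop_succ_cons]; exact hpreR)
      have hlb : K + 1 ≤ m := by
        by_contra hlt
        have hm1 : m - 1 + 1 = m := by omega
        have hdrop : [v] <+: List.drop (m - 1) rest := by
          rw [← List.drop_succ_cons (a := c), hm1]
          exact hpreC
        exact hminR (m - 1) (by omega) hdrop
      have : m = K + 1 := by omega
      omega

-- filter of shifted finds = shifted filter (all inputs ≥ -1)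
theorem shift_filter (L : List Int) (h : ∀ x ∈ L, -1 ≤ x) :
    (L.map (fun x => if x = -1 then -1 else x + 1)).filter (· != -1)
      = (L.filter (· != -1)).map (· + 1) := by
  induction L with
  | nil => simp
  | cons x t ih =>
    have hx := h x (List.mem_cons_self ..)
    have ht := fun y hy => h y (List.mem_cons_of_mem x hy)
    by_cases hx1 : x = -1
    · subst hx1; simpa using ih ht
    · have : x + 1 ≠ -1 := by omega
      simp only [List.map_cons, List.filter_cons, if_neg hx1]
      simp [hx1, this, ih ht]

theorem foldl_min_le_mem (t : List Int) (h x : Int) (hx : x ∈ h :: t) :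
    t.foldl min h ≤ x := by
  induction t generalizing h x with
  | nil =>
    simp only [List.foldl_nil]
    simp at hx
    omega
  | cons a t ih =>
    simp only [List.foldl_cons]
    rcases List.mem_cons.mp hx with rfl | hx'
    · exact le_trans (ih (min x a) (min x a) (List.mem_cons_self ..)) (min_le_left ..)
    · rcases List.mem_cons.mp hx' with rfl | h3
      · exact le_trans (ih (min h x) (min h x) (List.mem_cons_self ..)) (min_le_right ..)
      · exact ih (min h a) x (List.mem_cons_of_mem _ h3)

theorem le_foldl_min (t : List Int) (h b : Int) (hb : ∀ x ∈ h :: t, b ≤ x) :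
    b ≤ t.foldl min h := by
  induction t generalizing h with
  | nil => exact hb h (List.mem_cons_self ..)
  | cons a t ih =>
    simp only [List.foldl_cons]
    apply ih
    intro x hx
    rcases List.mem_cons.mp hx with rfl | hx'
    · exact le_min (hb h (List.mem_cons_self ..)) (hb a (by simp))
    · exact hb x (by simp [hx'])

theorem foldl_min_map_add_one (t : List Int) (h : Int) :
    (t.map (· + 1)).foldl min (h + 1) = t.foldl min h + 1 := by
  induction t generalizing h with
  | nil => simp
  | cons a t ih =>
    simp only [List.map_cons, List.foldl_cons, min_add_add_right]
    exact ih (min h a)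

-- every hit is a find result that passed the ≠ -1 filter, hence ≥ 0
theorem hits_nonneg (l : List Char) (x : Int)
    (hx : x ∈ (("aeiou".toList.map (fun v => PySem.Chars.find l [v])).filter (· != -1))) :
    0 ≤ x := by
  rw [List.mem_filter] at hx
  obtain ⟨hxm, hxf⟩ := hx
  obtain ⟨v, _, rfl⟩ := List.mem_map.mp hxm
  have := PySem.Chars.neg_one_le_find l [v]
  have hne : PySem.Chars.find l [v] ≠ -1 := by simpa using hxf
  omega

-- the minimum-or-length of the hits equals the first-vowel index
theorem minHits_eq (l : List Char) :
    (match (("aeiou".toList.map (fun v => PySem.Chars.find l [v])).filter (· != -1)) with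
      | h :: t => t.foldl min h
      | [] => (l.length : Int)) = pvFv l := by
  induction l with
  | nil =>
    simp only [find_single_nil, pvFv]
    norm_num
  | cons c rest ih =>
    by_cases hc : is_vowel c = true
    · -- head is a vowel: 0 is among the hits and all hits are ≥ 0
      have hcm : c ∈ "aeiou".toList := by simpa [is_vowel] using hc
      have hfc : PySem.Chars.find (c :: rest) [c] = 0 := by
        rw [find_single_cons]; simp
      have h0 : (0 : Int) ∈ (("aeiou".toList.map (fun v => PySem.Chars.find (c :: rest) [v])).filter (· != -1)) := by
        rw [List.mem_filter]
        exact ⟨List.mem_map.mpr ⟨c, hcm, hfc⟩, by norm_num⟩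
      have hfv : pvFv (c :: rest) = 0 := by simp [pvFv, hc]
      rw [hfv]
      cases hh : (("aeiou".toList.map (fun v => PySem.Chars.find (c :: rest) [v])).filter (· != -1)) with
      | nil => rw [hh] at h0; simp at h0
      | cons h t =>
        rw [hh] at h0
        simp only []
        have hle := foldl_min_le_mem t h 0 h0
        have hge := le_foldl_min t h 0 (by
          intro x hx
          exact hits_nonneg (c :: rest) x (hh ▸ hx))
        omega
    · -- head is a consonant: every find shifts by one
      have hcm : c ∉ "aeiou".toList := by
        intro h; exact absurd (by simpa [is_vowel] using h) hc
      have hmap : ("aeiou".toList.map (fun v => PySem.Chars.find (c :: rest) [v]))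
          = ("aeiou".toList.map (fun v => PySem.Chars.find rest [v])).map
              (fun x => if x = -1 then -1 else x + 1) := by
        rw [List.map_map]
        apply List.map_congr_left
        intro v hv
        have hne : c ≠ v := fun h => hcm (h ▸ hv)
        simp only [Function.comp]
        rw [find_single_cons, if_neg hne]
      have hflt := shift_filter ("aeiou".toList.map (fun v => PySem.Chars.find rest [v]))
        (by intro x hx
            obtain ⟨v, _, rfl⟩ := List.mem_map.mp hx
            exact PySem.Chars.neg_one_le_find rest [v])
      have hfv : pvFv (c :: rest) = pvFv rest + 1 := by simp [pvFv, hc]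
      rw [hfv, hmap, hflt, ← ih]
      cases hh : (("aeiou".toList.map (fun v => PySem.Chars.find rest [v])).filter (· != -1)) with
      | nil => simp
      | cons h t =>
        simp only [List.map_cons]
        exact foldl_min_map_add_one t h

-- B's result in closed form
theorem portB_eq (text : String) :
    get_consonant_cluster_index_alt text = max (pvFv text.toList - 1) 0 := by
  have h := minHits_eq text.toList
  unfold get_consonant_cluster_index_alt pvHits pvVOWELS
  simp only [PySem.Str.find_eq, String.toList_ofList]
  cases hh : (("aeiou".toList.map (fun v => PySem.Chars.find text.toList [v])).filter (· != -1)) with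
  | nil =>
    rw [hh] at h
    simp only [] at h
    simp only [PySem.Str.len_eq]
    rw [h]
  | cons a t =>
    rw [hh] at h
    simp only [] at h
    simp only []
    rw [h]

-- ===== VERDICT (by name: the statement is the Claim_ definition above) =====
theorem get_consonant_cluster_index_spec : Claim_equal_get_consonant_cluster_index := by
  intro text _
  unfold Spec_get_consonant_cluster_index
  rw [portA_eq, portB_eq]
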